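-- pv_equiv track=rewrite | github.com/naiaraAM/University-of-Tartu | Algorithmics/Final_exam/ex_01/ex_01_hash.py | compare_blocks
-- ===== SOURCE A (Python) =====
-- def compare_blocks(blocks1, blocks2, i, j, hash_range):
--     similar_blocks = []
--     for (k1_start, k1_end, hash1) in blocks1:
--         for (k2_start, k2_end, hash2) in blocks2:
--             if i == j and k1_start == k2_start:
--                 continue
--             if abs(hash1 - hash2) <= hash_range:
--                 similar_blocks.append((i, j, k1_start, k1_end, k2_start, k2_end))
--     return similar_blocks
-- ===== SOURCE B (Python) =====
-- def compare_blocks(blocks1, blocks2, i, j, hash_range):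
--     # Sort blocks2 by hash once; per block1 binary-search the hash window,
--     # then restore original blocks2 order by sorting matches on their index.
--     indexed = sorted(enumerate(blocks2), key=lambda t: t[1][2])
--     hashes = [b[2] for _, b in indexed]
--     m = len(hashes)
--
--     def bisect_left(x):
--         lo, hi = 0, m
--         while lo < hi:
--             mid = (lo + hi) // 2
--             if hashes[mid] < x:
--                 lo = mid + 1
--             else:
--                 hi = mid
--         return lo
--
--     def bisect_right(x):
--         lo, hi = 0, m
--         while lo < hi:
--             mid = (lo + hi) // 2
--             if hashes[mid] <= x:
--                 lo = mid + 1
--             else: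
--                 hi = mid
--         return lo
--
--     out = []
--     for (k1_start, k1_end, hash1) in blocks1:
--         lo = bisect_left(hash1 - hash_range)
--         hi = bisect_right(hash1 + hash_range)
--         matches = [t for t in indexed[lo:hi]
--                    if not (i == j and k1_start == t[1][0])]
--         matches.sort(key=lambda t: t[0])
--         out.extend((i, j, k1_start, k1_end, b[0], b[1]) for _, b in matches)
--     return out
-- ===== Notes on version B (the rewrite author's own statement) =====
-- stated objective: alternative
-- what changed: Instead of scanning all of blocks2 for every block in blocks1, B sorts blocks2 by hash once, binary-searches the [hash1-range, hash1+range] window for each block1, and re-sorts the window's matches by original index to restore A's output order; it trades the full inner scan for sort+bisect, which pays off only when the matching windows are narrow.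
import Mathlib
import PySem

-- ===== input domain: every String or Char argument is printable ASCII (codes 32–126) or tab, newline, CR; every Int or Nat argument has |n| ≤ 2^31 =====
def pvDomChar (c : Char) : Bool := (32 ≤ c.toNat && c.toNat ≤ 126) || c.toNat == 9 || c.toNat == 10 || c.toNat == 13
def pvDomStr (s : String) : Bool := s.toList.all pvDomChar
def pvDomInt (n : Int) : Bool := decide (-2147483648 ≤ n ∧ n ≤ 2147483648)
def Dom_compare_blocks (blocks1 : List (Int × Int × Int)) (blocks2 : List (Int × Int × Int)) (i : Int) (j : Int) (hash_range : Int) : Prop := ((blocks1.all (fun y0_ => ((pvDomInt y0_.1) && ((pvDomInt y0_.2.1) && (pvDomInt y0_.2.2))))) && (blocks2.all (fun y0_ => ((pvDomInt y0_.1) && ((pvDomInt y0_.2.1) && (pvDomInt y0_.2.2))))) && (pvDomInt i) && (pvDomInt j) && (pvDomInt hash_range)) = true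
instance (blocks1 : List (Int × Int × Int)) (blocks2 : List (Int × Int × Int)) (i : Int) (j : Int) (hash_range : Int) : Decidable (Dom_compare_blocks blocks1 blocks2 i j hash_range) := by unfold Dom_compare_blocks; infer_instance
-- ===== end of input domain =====

-- B sorts blocks2 by hash once and binary-searches the hash window per block of blocks1
-- (restoring original order by index), instead of A's full nested scan; proved to return
-- exactly A's value on all inputs.


-- ===== PORT A =====
-- literal transliteration of Source A: nested loops, 'continue' on the same-start clash, append on |hash1-hash2| ≤ hash_range
def compare_blocks (blocks1 : List (Int × Int × Int)) (blocks2 : List (Int × Int × Int)) (i : Int) (j : Int) (hash_range : Int) : List (Int × Int × Int × Int × Int × Int) :=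
  blocks1.foldl (fun acc b1 =>
    blocks2.foldl (fun acc2 b2 =>
      if i = j ∧ b1.1 = b2.1 then acc2
      else if |b1.2.2 - b2.2.2| ≤ hash_range then
        acc2 ++ [(i, j, b1.1, b1.2.1, b2.1, b2.2.1)]
      else acc2) acc) []

-- ===== PORT B =====
-- transliteration of Source B; its hand-written bisect_left/bisect_right ARE Python's bisect algorithm,
-- ported as PySem.List.bisectLeft/bisectRight (exact same binary search)
def compare_blocks_alt (blocks1 : List (Int × Int × Int)) (blocks2 : List (Int × Int × Int)) (i : Int) (j : Int) (hash_range : Int) : List (Int × Int × Int × Int × Int × Int) :=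
  let indexed := PySem.List.sorted (PySem.List.enumerate blocks2 0) (fun t => t.2.2.2)
  let hashes := indexed.map (fun t => t.2.2.2)
  blocks1.foldl (fun acc b1 =>
    let lo := PySem.List.bisectLeft hashes (b1.2.2 - hash_range)
    let hi := PySem.List.bisectRight hashes (b1.2.2 + hash_range)
    let matched := (PySem.List.slice indexed (some (lo : Int)) (some (hi : Int))).filter
        (fun t => !(decide (i = j ∧ b1.1 = t.2.1)))
    acc ++ (PySem.List.sorted matched (fun t => t.1)).map
        (fun t => (i, j, b1.1, b1.2.1, t.2.1, t.2.2.1))) []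

-- ===== PRECONDITION & SPEC =====
def Spec_compare_blocks (blocks1 : List (Int × Int × Int)) (blocks2 : List (Int × Int × Int)) (i : Int) (j : Int) (hash_range : Int) (out : List (Int × Int × Int × Int × Int × Int)) : Prop := out = compare_blocks_alt blocks1 blocks2 i j hash_range
instance (blocks1 : List (Int × Int × Int)) (blocks2 : List (Int × Int × Int)) (i : Int) (j : Int) (hash_range : Int) (out : List (Int × Int × Int × Int × Int × Int)) : Decidable (Spec_compare_blocks blocks1 blocks2 i j hash_range out) := by unfold Spec_compare_blocks; infer_instance

-- ===== CLAIM (what is proved, stated in full; the proofs are below) =====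
def Claim_equal_compare_blocks : Prop := ∀ (blocks1 : List (Int × Int × Int)) (blocks2 : List (Int × Int × Int)) (i : Int) (j : Int) (hash_range : Int), Dom_compare_blocks blocks1 blocks2 i j hash_range → Spec_compare_blocks blocks1 blocks2 i j hash_range (compare_blocks blocks1 blocks2 i j hash_range)

-- ===== LEMMAS AND PROOFS =====

-- the predicate under which A keeps a pair, and the tuple it emits
def pvKeep (i j : Int) (b1 : Int × Int × Int) (r : Int) (b2 : Int × Int × Int) : Bool :=
  !(decide (i = j ∧ b1.1 = b2.1)) && decide (|b1.2.2 - b2.2.2| ≤ r)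

def pvMk (i j : Int) (b1 b2 : Int × Int × Int) : Int × Int × Int × Int × Int × Int :=
  (i, j, b1.1, b1.2.1, b2.1, b2.2.1)

theorem pvA_inner (i j r : Int) (b1 : Int × Int × Int) :
    ∀ (l : List (Int × Int × Int)) (acc : List (Int × Int × Int × Int × Int × Int)),
    l.foldl (fun acc2 b2 =>
      if i = j ∧ b1.1 = b2.1 then acc2
      else if |b1.2.2 - b2.2.2| ≤ r then acc2 ++ [(i, j, b1.1, b1.2.1, b2.1, b2.2.1)]
      else acc2) acc = acc ++ (l.filter (pvKeep i j b1 r)).map (pvMk i j b1) := by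
  intro l
  induction l with
  | nil => intro acc; simp
  | cons x xs ih =>
    intro acc
    simp only [List.foldl_cons, List.filter_cons]
    by_cases h1 : i = j ∧ b1.1 = x.1
    · have hk : pvKeep i j b1 r x = false := by simp [pvKeep, h1]
      rw [if_pos h1, hk]
      simp only [Bool.false_eq_true, if_false]
      exact ih acc
    · by_cases h2 : |b1.2.2 - x.2.2| ≤ r
      · have hk : pvKeep i j b1 r x = true := by simp [pvKeep, h1, h2]
        rw [if_neg h1, if_pos h2, hk, if_pos rfl, ih]
        simp [pvMk]
      · have hk : pvKeep i j b1 r x = false := by simp [pvKeep, h1, h2]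
        rw [if_neg h1, if_neg h2, hk]
        simp only [Bool.false_eq_true, if_false]
        exact ih acc

theorem pvA_char (blocks1 blocks2 : List (Int × Int × Int)) (i j r : Int) :
    compare_blocks blocks1 blocks2 i j r
      = blocks1.flatMap (fun b1 => (blocks2.filter (pvKeep i j b1 r)).map (pvMk i j b1)) := by
  unfold compare_blocks
  have hf : (fun (acc : List (Int × Int × Int × Int × Int × Int)) (b1 : Int × Int × Int) =>
      blocks2.foldl (fun acc2 b2 =>
        if i = j ∧ b1.1 = b2.1 then acc2
        else if |b1.2.2 - b2.2.2| ≤ r then acc2 ++ [(i, j, b1.1, b1.2.1, b2.1, b2.2.1)]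
        else acc2) acc)
      = fun acc b1 => acc ++ (blocks2.filter (pvKeep i j b1 r)).map (pvMk i j b1) := by
    funext acc b1; exact pvA_inner i j r b1 blocks2 acc
  rw [hf, PySem.List.foldl_append_eq_flatMap, List.nil_append]

-- the bisect window of a key-sorted list is exactly its elements with key in [a,b]
theorem pvWindow_filter {α : Type} (key : α → Int) (l : List α)
    (hs : l.Pairwise (fun x y => key x ≤ key y)) (a b : Int) :
    List.take (PySem.List.bisectRight (l.map key) b - PySem.List.bisectLeft (l.map key) a)
      (List.drop (PySem.List.bisectLeft (l.map key) a) l)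
      = l.filter (fun x => decide (a ≤ key x ∧ key x ≤ b)) := by
  have hmap : (l.map key).Pairwise (fun x y => x ≤ y) :=
    List.Pairwise.map key (fun _ _ h => h) hs
  obtain ⟨hL1, hL2, hL3⟩ := PySem.List.bisectLeft_spec (l.map key) a hmap
  obtain ⟨hR1, hR2, hR3⟩ := PySem.List.bisectRight_spec (l.map key) b hmap
  set L := PySem.List.bisectLeft (l.map key) a with hLdef
  set R := PySem.List.bisectRight (l.map key) b with hRdef
  simp only [List.length_map] at hL1 hR1
  have hlt : ∀ (k : Nat) (hk : k < l.length), k < L → key l[k] < a := by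
    intro k hk h; have := hL2 k (by simpa using hk) h; simpa using this
  have hge : ∀ (k : Nat) (hk : k < l.length), L ≤ k → a ≤ key l[k] := by
    intro k hk h; have := hL3 k (by simpa using hk) h; simpa using this
  have hle : ∀ (k : Nat) (hk : k < l.length), k < R → key l[k] ≤ b := by
    intro k hk h; have := hR2 k (by simpa using hk) h; simpa using this
  have hgt : ∀ (k : Nat) (hk : k < l.length), R ≤ k → b < key l[k] := by
    intro k hk h; have := hR3 k (by simpa using hk) h; simpa using this
  by_cases hRL : R ≤ L
  · rw [Nat.sub_eq_zero_of_le hRL, List.take_zero]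
    symm
    rw [List.filter_eq_nil_iff]
    intro x hx
    obtain ⟨k, hk, rfl⟩ := List.mem_iff_getElem.mp hx
    simp only [decide_eq_true_eq, not_and, not_le]
    intro ha
    rcases lt_or_ge k R with h | h
    · exact absurd ha (not_le.mpr (hlt k hk (lt_of_lt_of_le h hRL)))
    · exact hgt k hk h
  · have hLR : L ≤ R := le_of_not_ge hRL
    have hdecomp : l = l.take L ++ (List.take (R - L) (l.drop L) ++ l.drop R) := by
      conv_lhs => rw [← List.take_append_drop L l]
      congr 1
      conv_lhs => rw [← List.take_append_drop (R - L) (l.drop L)]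
      congr 1
      rw [List.drop_drop]
      congr 1
      omega
    conv_rhs => rw [hdecomp]
    rw [List.filter_append, List.filter_append]
    have h1 : (l.take L).filter (fun x => decide (a ≤ key x ∧ key x ≤ b)) = [] := by
      rw [List.filter_eq_nil_iff]
      intro x hx
      obtain ⟨k, hk, rfl⟩ := List.mem_iff_getElem.mp hx
      have hk' : k < l.length := lt_of_lt_of_le hk (by simp [List.length_take])
      have hkL : k < L := lt_of_lt_of_le hk (by simp [List.length_take])
      have := hlt k hk' hkL
      simp only [List.getElem_take, decide_eq_true_eq, not_and, not_le]
      intro ha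
      exact absurd ha (not_le.mpr (by simpa [List.getElem_take] using this))
    have h2 : (List.take (R - L) (l.drop L)).filter (fun x => decide (a ≤ key x ∧ key x ≤ b))
        = List.take (R - L) (l.drop L) := by
      rw [List.filter_eq_self]
      intro x hx
      obtain ⟨k, hk, rfl⟩ := List.mem_iff_getElem.mp hx
      have hkRL : k < R - L := lt_of_lt_of_le hk (by simp [List.length_take])
      have hkd : k < (l.drop L).length := lt_of_lt_of_le hk (by simp [List.length_take])
      have hk' : L + k < l.length := by simp [List.length_drop] at hkd; omega
      have hx1 : a ≤ key l[L + k] := hge (L + k) hk' (by omega)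
      have hx2 : key l[L + k] ≤ b := hle (L + k) hk' (by omega)
      simp only [List.getElem_take, List.getElem_drop, decide_eq_true_eq]
      exact ⟨hx1, hx2⟩
    have h3 : (l.drop R).filter (fun x => decide (a ≤ key x ∧ key x ≤ b)) = [] := by
      rw [List.filter_eq_nil_iff]
      intro x hx
      obtain ⟨k, hk, rfl⟩ := List.mem_iff_getElem.mp hx
      have hk' : R + k < l.length := by simp [List.length_drop] at hk; omega
      have := hgt (R + k) hk' (by omega)
      simp only [List.getElem_drop, decide_eq_true_eq, not_and, not_le]
      intro _
      exact this
    rw [h1, h2, h3, List.nil_append, List.append_nil]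

-- filtering and projecting the enumeration equals filtering and projecting the list itself
theorem pvEnum_filter_map {β : Type} (q : (Int × Int × Int) → Bool) (f : (Int × Int × Int) → β) :
    ∀ (l : List (Int × Int × Int)) (s : Int),
    ((PySem.List.enumerate l s).filter (fun t => q t.2)).map (fun t => f t.2)
      = (l.filter q).map f := by
  intro l
  induction l with
  | nil => intro s; simp [PySem.List.enumerate]
  | cons x xs ih =>
    intro s
    rw [PySem.List.enumerate_cons, List.filter_cons, List.filter_cons]
    by_cases hq : q x
    · simp only [hq, if_pos, List.map_cons]
      rw [ih]
    · simp only [hq]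
      simp only [Bool.false_eq_true, if_false]
      rw [ih]

-- B's per-block1 window computation equals A's per-block1 filtered scan
theorem pvPer_b1 (blocks2 : List (Int × Int × Int)) (i j r : Int) (b1 : Int × Int × Int) :
    (PySem.List.sorted
      ((PySem.List.slice (PySem.List.sorted (PySem.List.enumerate blocks2 0) (fun t => t.2.2.2))
          (some ((PySem.List.bisectLeft ((PySem.List.sorted (PySem.List.enumerate blocks2 0) (fun t => t.2.2.2)).map (fun t => t.2.2.2)) (b1.2.2 - r) : Nat) : Int))
          (some ((PySem.List.bisectRight ((PySem.List.sorted (PySem.List.enumerate blocks2 0) (fun t => t.2.2.2)).map (fun t => t.2.2.2)) (b1.2.2 + r) : Nat) : Int))).filter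
        (fun t => !(decide (i = j ∧ b1.1 = t.2.1)))) (fun t => t.1)).map
      (fun t => (i, j, b1.1, b1.2.1, t.2.1, t.2.2.1))
    = (blocks2.filter (pvKeep i j b1 r)).map (pvMk i j b1) := by
  set idx := PySem.List.sorted (PySem.List.enumerate blocks2 0) (fun t => t.2.2.2) with hidx
  have hsorted : idx.Pairwise (fun x y => x.2.2.2 ≤ y.2.2.2) :=
    PySem.List.sorted_pairwise (PySem.List.enumerate blocks2 0) (fun t => t.2.2.2)
  rw [PySem.List.slice_natCast]
  rw [pvWindow_filter (fun t => t.2.2.2) idx hsorted (b1.2.2 - r) (b1.2.2 + r)]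
  rw [List.filter_filter]
  have hpred : idx.filter (fun t =>
        (!(decide (i = j ∧ b1.1 = t.2.1))) && decide (b1.2.2 - r ≤ t.2.2.2 ∧ t.2.2.2 ≤ b1.2.2 + r))
      = idx.filter (fun t => pvKeep i j b1 r t.2) := by
    apply List.filter_congr
    intro t _
    have hiff : (|b1.2.2 - t.2.2.2| ≤ r) ↔ (b1.2.2 - r ≤ t.2.2.2 ∧ t.2.2.2 ≤ b1.2.2 + r) := by
      rw [abs_le]; omega
    simp [pvKeep, hiff]
  rw [hpred]
  have hperm : ((PySem.List.enumerate blocks2 0).filter (fun t => pvKeep i j b1 r t.2)).Perm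
      (idx.filter (fun t => pvKeep i j b1 r t.2)) :=
    (List.Perm.filter _ (PySem.List.sorted_perm (PySem.List.enumerate blocks2 0) (fun t => t.2.2.2) false)).symm
  have hpw : ((PySem.List.enumerate blocks2 0).filter (fun t => pvKeep i j b1 r t.2)).Pairwise
      (fun p q => p.1 < q.1) :=
    List.Pairwise.filter _ (PySem.List.pairwise_lt_enumerate blocks2 0)
  rw [PySem.List.sorted_eq_of_perm_of_pairwise_lt _ _ (fun t => t.1) hperm hpw]
  exact pvEnum_filter_map (pvKeep i j b1 r) (pvMk i j b1) blocks2 0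

theorem pvB_char (blocks1 blocks2 : List (Int × Int × Int)) (i j r : Int) :
    compare_blocks_alt blocks1 blocks2 i j r
      = blocks1.flatMap (fun b1 => (blocks2.filter (pvKeep i j b1 r)).map (pvMk i j b1)) := by
  simp only [compare_blocks_alt]
  have hf : (fun (acc : List (Int × Int × Int × Int × Int × Int)) (b1 : Int × Int × Int) =>
      acc ++ (PySem.List.sorted
        ((PySem.List.slice (PySem.List.sorted (PySem.List.enumerate blocks2 0) (fun t => t.2.2.2))
            (some ((PySem.List.bisectLeft ((PySem.List.sorted (PySem.List.enumerate blocks2 0) (fun t => t.2.2.2)).map (fun t => t.2.2.2)) (b1.2.2 - r) : Nat) : Int))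
            (some ((PySem.List.bisectRight ((PySem.List.sorted (PySem.List.enumerate blocks2 0) (fun t => t.2.2.2)).map (fun t => t.2.2.2)) (b1.2.2 + r) : Nat) : Int))).filter
          (fun t => !(decide (i = j ∧ b1.1 = t.2.1)))) (fun t => t.1)).map
        (fun t => (i, j, b1.1, b1.2.1, t.2.1, t.2.2.1)))
      = fun acc b1 => acc ++ (blocks2.filter (pvKeep i j b1 r)).map (pvMk i j b1) := by
    funext acc b1
    rw [pvPer_b1 blocks2 i j r b1]
  rw [hf, PySem.List.foldl_append_eq_flatMap, List.nil_append]

-- ===== VERDICT (by name: the statement is the Claim_ definition above) =====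
theorem compare_blocks_spec : Claim_equal_compare_blocks := by
  intro blocks1 blocks2 i j hash_range _
  unfold Spec_compare_blocks
  rw [pvA_char, pvB_char]
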